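-- pv_equiv track=rewrite | github.com/deepinv/deepinv | deepinv/physics/forward.py | _default_local_indices
-- ===== SOURCE A (Python) =====
-- from typing import Union, Optional, Callable, List, Tuple
--
-- def _default_local_indices(num_ops: int, world_size: int, rank: int, sharding: str) -> List[int]:
--     if sharding == "round_robin":
--         return [i for i in range(num_ops) if (i % world_size) == rank]
--     elif sharding == "block":
--         ops_per_rank = (num_ops + world_size - 1) // world_size
--         start = rank * ops_per_rank
--         end = min(start + ops_per_rank, num_ops)
--         return list(range(start, end))
--     else:
--         raise ValueError("sharding must be either 'round_robin' or 'block'.")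
-- ===== SOURCE B (Python) =====
-- from typing import List
--
--
-- def _default_local_indices(num_ops: int, world_size: int, rank: int, sharding: str) -> List[int]:
--     if sharding == "round_robin":
--         # a rank outside the world owns no operators
--         if 0 <= rank < world_size:
--             return list(range(rank, num_ops, world_size))
--         return []
--     if sharding == "block":
--         per = -((-num_ops) // world_size)  # ceil(num_ops / world_size)
--         lo = rank * per
--         return list(range(lo, min(lo + per, num_ops)))
--     raise ValueError("sharding must be either 'round_robin' or 'block'.")
-- ===== Notes on version B (the rewrite author's own statement) =====
-- stated objective: alternative
-- what changed: round_robin emits this rank's indices directly as a strided range (output-sized work) instead of scanning and filtering all num_ops indices, and block uses negated-floor ceiling division; Pre_ restricts to the natural domain world_size >= 1 (A raises ZeroDivisionError at world_size = 0, and a non-positive world size is a nonsensical process count on which A's values are artefacts of Python's negative modulus/floor division) and to the two accepted sharding strings (A raises ValueError otherwise).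
-- outside the precondition, e.g. on _default_local_indices(5, -2, -1, 'round_robin'): A returns [1, 3], B returns []; on _default_local_indices(5, -2, -1, 'block'): A returns [], B returns []
import Mathlib
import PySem

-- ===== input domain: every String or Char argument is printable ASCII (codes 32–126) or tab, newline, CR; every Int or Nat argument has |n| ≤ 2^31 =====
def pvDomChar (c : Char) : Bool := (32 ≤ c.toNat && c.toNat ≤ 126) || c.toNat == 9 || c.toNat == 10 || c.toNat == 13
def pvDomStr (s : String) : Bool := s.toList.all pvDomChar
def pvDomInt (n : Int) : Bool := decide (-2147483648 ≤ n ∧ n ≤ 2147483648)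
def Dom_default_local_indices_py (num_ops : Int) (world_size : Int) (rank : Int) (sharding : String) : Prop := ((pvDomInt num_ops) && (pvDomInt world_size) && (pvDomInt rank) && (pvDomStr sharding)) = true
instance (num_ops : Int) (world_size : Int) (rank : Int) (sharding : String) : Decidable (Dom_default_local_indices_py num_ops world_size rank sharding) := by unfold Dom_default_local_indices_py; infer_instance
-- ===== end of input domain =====

-- B's round_robin branch emits this rank's indices directly as a strided range instead of
-- scanning and filtering all num_ops indices; block uses negated-floor ceiling division.


-- ===== PORT A =====
def default_local_indices_py (num_ops : Int) (world_size : Int) (rank : Int) (sharding : String) : List Int :=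
  if sharding = "round_robin" then
    (PySem.List.pyRange 0 num_ops 1).filter (fun i => PySem.Int.mod i world_size == rank)
  else if sharding = "block" then
    let ops_per_rank := PySem.Int.floordiv (num_ops + world_size - 1) world_size
    let start := rank * ops_per_rank
    let stop := min (start + ops_per_rank) num_ops
    PySem.List.pyRange start stop 1
  else []  -- raise ValueError: excluded by Pre_

-- ===== PORT B =====
def default_local_indices_py_alt (num_ops : Int) (world_size : Int) (rank : Int) (sharding : String) : List Int :=
  if sharding = "round_robin" then
    if 0 ≤ rank ∧ rank < world_size then
      PySem.List.pyRange rank num_ops world_size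
    else []
  else if sharding = "block" then
    let per := -(PySem.Int.floordiv (-num_ops) world_size)
    let lo := rank * per
    PySem.List.pyRange lo (min (lo + per) num_ops) 1
  else []  -- raise ValueError: excluded by Pre_

-- ===== PRECONDITION & SPEC =====
-- Pre_ restricts to the task's natural domain: one of the two accepted sharding strings (A raises
-- ValueError otherwise) and world_size ≥ 1 — a world size is a positive process count; A raises
-- ZeroDivisionError at world_size = 0, and for negative world_size A's returned values are
-- artefacts of Python's negative modulus / floor division on a nonsensical input.
def Pre_default_local_indices_py (num_ops : Int) (world_size : Int) (rank : Int) (sharding : String) : Prop :=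
  (sharding = "round_robin" ∨ sharding = "block") ∧ 1 ≤ world_size
instance (num_ops : Int) (world_size : Int) (rank : Int) (sharding : String) : Decidable (Pre_default_local_indices_py num_ops world_size rank sharding) := by unfold Pre_default_local_indices_py; infer_instance

def pvWitness_default_local_indices_py : Int × Int × Int × String := (8, 3, 1, "round_robin")

def Spec_default_local_indices_py (num_ops : Int) (world_size : Int) (rank : Int) (sharding : String) (out : List Int) : Prop := out = default_local_indices_py_alt num_ops world_size rank sharding
instance (num_ops : Int) (world_size : Int) (rank : Int) (sharding : String) (out : List Int) : Decidable (Spec_default_local_indices_py num_ops world_size rank sharding out) := by unfold Spec_default_local_indices_py; infer_instance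

-- ===== CLAIM =====
def Claim_equal_default_local_indices_py : Prop := ∀ (num_ops : Int) (world_size : Int) (rank : Int) (sharding : String), Dom_default_local_indices_py num_ops world_size rank sharding → Pre_default_local_indices_py num_ops world_size rank sharding → Spec_default_local_indices_py num_ops world_size rank sharding (default_local_indices_py num_ops world_size rank sharding)

-- ===== LEMMAS AND PROOFS =====

-- Python's i % ws for ws > 0 is Lean's emod.
lemma pv_mod_pos (ws x : Int) (hws : 0 < ws) : PySem.Int.mod x ws = x % ws := by
  simp only [PySem.Int.mod, Int.fmod_eq_emod, if_pos (Or.inl (le_of_lt hws)), add_zero]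

-- x % t (t > 0) characterised by divisibility: x % t = s ↔ t ∣ x - s, for 0 ≤ s < t.
lemma pv_emod_char (t x s : Int) (ht : 0 < t) (hs0 : 0 ≤ s) (hst : s < t) :
    x % t = s ↔ t ∣ x - s := by
  constructor
  · intro h
    refine ⟨x / t, ?_⟩
    have h2 := Int.emod_add_mul_ediv x t
    linarith
  · rintro ⟨k, hk⟩
    have hx : x = s + t * k := by linarith
    rw [hx, Int.add_mul_emod_self_left, Int.emod_eq_of_lt hs0 hst]

-- The strided pyRange is strictly increasing (step > 0).
lemma pv_pairwise_pyRange (a b s : Int) (hs : 0 < s) :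
    (PySem.List.pyRange a b s).Pairwise (· < ·) := by
  rw [PySem.List.pyRange_of_pos a b hs]
  refine List.Pairwise.map _ ?_ List.pairwise_lt_range
  intro k k' hk
  have h1 : (k : Int) < (k' : Int) := by exact_mod_cast hk
  nlinarith

-- A's scan-and-filter round_robin branch equals B's gated strided range (world_size ≥ 1).
lemma pv_rr_eq (n ws rank : Int) (hws : 1 ≤ ws) :
    (PySem.List.pyRange 0 n 1).filter (fun i => PySem.Int.mod i ws == rank)
      = if 0 ≤ rank ∧ rank < ws then PySem.List.pyRange rank n ws else [] := by
  have ht : (0 : Int) < ws := by omega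
  split_ifs with hC
  · refine List.Perm.eq_of_pairwise (le := (· < ·)) (fun a b _ _ h1 h2 => absurd h2 (by omega))
      ?_ ?_ ?_
    · exact List.Pairwise.sublist List.filter_sublist (PySem.List.pairwise_lt_pyRange_one 0 n)
    · exact pv_pairwise_pyRange rank n ws ht
    · refine (List.perm_ext_iff_of_nodup ?_ ?_).mpr ?_
      · exact (PySem.List.nodup_pyRange_one 0 n).filter _
      · exact List.Pairwise.imp (fun h => ne_of_lt h) (pv_pairwise_pyRange rank n ws ht)
      · intro x
        rw [List.mem_filter, PySem.List.mem_pyRange_one,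
          PySem.List.mem_pyRange_iff_of_pos ht, beq_iff_eq]
        constructor
        · rintro ⟨⟨hx0, hxn⟩, hmod⟩
          rw [pv_mod_pos ws x ht] at hmod
          have hd := (pv_emod_char ws x rank ht hC.1 hC.2).mp hmod
          have hrx : rank ≤ x := by
            rcases hd with ⟨k, hk⟩
            by_cases h : 0 ≤ k
            · nlinarith
            · nlinarith
          exact ⟨hrx, hxn, hd⟩
        · rintro ⟨hrx, hxn, hdvd⟩
          have hx0 : 0 ≤ x := by omega
          rw [pv_mod_pos ws x ht]
          exact ⟨⟨hx0, hxn⟩, (pv_emod_char ws x rank ht hC.1 hC.2).mpr hdvd⟩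
  · rw [List.filter_eq_nil_iff]
    intro x hx
    rw [PySem.List.mem_pyRange_one] at hx
    simp only [beq_iff_eq]
    intro hmod
    rw [pv_mod_pos ws x ht] at hmod
    have h1 : 0 ≤ x % ws := Int.emod_nonneg x (by omega)
    have h2 : x % ws < ws := Int.emod_lt_of_pos x ht
    omega

-- A's (n + ws - 1) // ws equals B's -((-n) // ws) for ws ≥ 1 (both are ⌈n / ws⌉).
lemma pv_ceil_eq (n ws : Int) (hws : 1 ≤ ws) :
    PySem.Int.floordiv (n + ws - 1) ws = -(PySem.Int.floordiv (-n) ws) := by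
  have ht : (0 : Int) < ws := by omega
  have hA : PySem.Int.floordiv (n + ws - 1) ws = (n + ws - 1) / ws := by
    simp only [PySem.Int.floordiv, Int.fdiv_eq_ediv, if_pos (Or.inl (le_of_lt ht)), sub_zero]
  have hB : PySem.Int.floordiv (-n) ws = (-n) / ws := by
    simp only [PySem.Int.floordiv, Int.fdiv_eq_ediv, if_pos (Or.inl (le_of_lt ht)), sub_zero]
  rw [hA, hB]
  set q : Int := (-n) / ws with hq
  have hr := Int.emod_add_mul_ediv (-n) ws
  have hr0 : 0 ≤ (-n) % ws := Int.emod_nonneg _ (by omega)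
  have hrlt : (-n) % ws < ws := Int.emod_lt_of_pos _ ht
  set r : Int := (-n) % ws with hrdef
  have hn : n + ws - 1 = (ws - 1 - r) + (-q) * ws := by linarith
  rw [hn, Int.add_mul_ediv_right _ _ (by omega : ws ≠ 0),
    Int.ediv_eq_zero_of_lt (by omega) (by omega)]
  ring

-- ===== VERDICT =====
theorem default_local_indices_py_spec : Claim_equal_default_local_indices_py := by
  intro num_ops world_size rank sharding _ hpre
  obtain ⟨hsh, hws⟩ := hpre
  unfold Spec_default_local_indices_py default_local_indices_py default_local_indices_py_alt
  rcases hsh with hsh | hsh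
  · subst hsh
    rw [if_pos rfl, if_pos rfl, pv_rr_eq num_ops world_size rank hws]
  · subst hsh
    have h1 : ("block" : String) ≠ "round_robin" := by decide
    rw [if_neg h1, if_neg h1, pv_ceil_eq num_ops world_size hws]
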